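-- pv_equiv track=rewrite | github.com/kmoreti/python-masterclass | IntroToLists/test.py | Solution
-- ===== SOURCE A (Python) =====
-- max_value = 1000000000
--
-- def calc(n: int):
--     if n == 1:
--         return 0
--     result = 1
--     if n > 1:
--         for f in range(2, n):
--             result += f
--             if result > max_value:
--                 break
--     return result
--
-- def Solution(A):
--     m = dict()
--     for i in A:
--         if i not in m:
--             m[i] = 1
--         else:
--             m[i] = m[i] + 1
--     total = 0
--     for v in m:
--         total += calc(m[v])
--         if total > max_value:
--             return max_value
--     return total
-- ===== SOURCE B (Python) =====
-- max_value = 1000000000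
--
-- def Solution(A):
--     counts = {}
--     for i in A:
--         counts[i] = counts.get(i, 0) + 1
--     total = sum(c * (c - 1) // 2 for c in counts.values())
--     return max_value if total > max_value else total
-- ===== Notes on version B (the rewrite author's own statement) =====
-- stated objective: alternative
-- what changed: calc's accumulation loop (1+2+...+(n-1) with an early break) is replaced by the closed-form triangular number c*(c-1)//2, and the early 'return max_value' inside the summation loop becomes a single final cap of the total.
import Mathlib
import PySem

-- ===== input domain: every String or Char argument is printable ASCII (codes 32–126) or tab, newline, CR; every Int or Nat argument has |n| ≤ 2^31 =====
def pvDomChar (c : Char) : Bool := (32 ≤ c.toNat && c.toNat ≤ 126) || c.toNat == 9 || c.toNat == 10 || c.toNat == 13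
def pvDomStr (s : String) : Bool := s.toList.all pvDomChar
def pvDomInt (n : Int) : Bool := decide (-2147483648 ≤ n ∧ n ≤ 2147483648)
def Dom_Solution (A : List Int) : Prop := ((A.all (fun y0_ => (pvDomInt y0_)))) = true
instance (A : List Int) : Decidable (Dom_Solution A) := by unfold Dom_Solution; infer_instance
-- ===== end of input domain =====

-- B replaces calc's accumulation loop by the closed-form triangular number c*(c-1)//2
-- and caps the total once at the end instead of returning early.

-- ===== PORT A =====
def pvMax : Int := 1000000000

-- the 'for f in range(2, n)' loop of calc, with its break
def calcLoop : List Int → Int → Int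
  | [], result => result
  | f :: fs, result =>
      let result' := result + f
      if result' > pvMax then result' else calcLoop fs result'

def pvCalc (n : Int) : Int :=
  if n == 1 then 0
  else
    let result : Int := 1
    if n > 1 then calcLoop (PySem.List.pyRange 2 n 1) result else result

-- the 'for v in m:' loop of Solution, with its early return of max_value
def solLoop (m : PySem.Dict Int Int) : List Int → Int → Int
  | [], total => total
  | v :: vs, total =>
      let total' := total + pvCalc (m.getD v 0)  -- m[v]: exact, v is always a key of m here
      if total' > pvMax then pvMax else solLoop m vs total'

def Solution (A : List Int) : Int :=
  let m := A.foldl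
    (fun d i => if d.contains i = false then d.insert i 1 else d.insert i (d.getD i 0 + 1))
    PySem.Dict.empty
  solLoop m m.keys 0

-- ===== PORT B =====
def Solution_alt (A : List Int) : Int :=
  let counts := A.foldl (fun d i => d.insert i (d.getD i 0 + 1)) (PySem.Dict.empty : PySem.Dict Int Int)
  let total := (counts.values.map (fun c => PySem.Int.floordiv (c * (c - 1)) 2)).sum
  if total > 1000000000 then 1000000000 else total

-- ===== PRECONDITION & SPEC =====
def Spec_Solution (A : List Int) (out : Int) : Prop := out = Solution_alt A
instance (A : List Int) (out : Int) : Decidable (Spec_Solution A out) := by unfold Spec_Solution; infer_instance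

-- ===== CLAIM (what is proved, stated in full; the proofs are below) =====
def Claim_equal_Solution : Prop := ∀ (A : List Int), Dom_Solution A → Spec_Solution A (Solution A)

-- ===== LEMMAS AND PROOFS =====

-- closed-form triangular number used by B
def pvTri (c : Int) : Int := PySem.Int.floordiv (c * (c - 1)) 2

theorem tri_nonneg (c : Int) : 0 ≤ pvTri c := by
  unfold pvTri
  rw [PySem.Int.floordiv_eq_ediv_of_pos (by norm_num)]
  apply Int.ediv_nonneg _ (by norm_num)
  nlinarith [sq_nonneg (2*c - 1)]

theorem sum_pyRange_two (n : Int) (h : 2 ≤ n) :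
    2 * (PySem.List.pyRange 2 n 1).sum = n * (n - 1) - 2 := by
  induction n, h using Int.le_induction with
  | base => rw [PySem.List.pyRange_one_eq_nil (by omega)]; norm_num
  | succ n hn ih =>
      rw [PySem.List.pyRange_one_succ_right (by omega)]
      simp only [List.sum_append, List.sum_cons, List.sum_nil]
      linear_combination ih

theorem calcLoop_cons (f : Int) (fs : List Int) (r : Int) :
    calcLoop (f :: fs) r = if r + f > pvMax then r + f else calcLoop fs (r + f) := rfl

theorem solLoop_cons (m : PySem.Dict Int Int) (v : Int) (vs : List Int) (total : Int) :
    solLoop m (v :: vs) total =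
      if total + pvCalc (m.getD v 0) > pvMax then pvMax
      else solLoop m vs (total + pvCalc (m.getD v 0)) := rfl

theorem calcLoop_spec (l : List Int) (r : Int) (hl : ∀ f ∈ l, 0 ≤ f) (hr : 0 ≤ r) :
    0 ≤ calcLoop l r ∧
      (calcLoop l r = r + l.sum ∨ (calcLoop l r > pvMax ∧ r + l.sum > pvMax)) := by
  induction l generalizing r with
  | nil => exact ⟨hr, Or.inl (by simp [calcLoop])⟩
  | cons f fs ih =>
      have hf : 0 ≤ f := hl f (by simp)
      have hfs : ∀ g ∈ fs, 0 ≤ g := fun g hg => hl g (List.mem_cons_of_mem _ hg)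
      have hsum : 0 ≤ fs.sum := List.sum_nonneg hfs
      rw [calcLoop_cons]
      by_cases hbrk : r + f > pvMax
      · rw [if_pos hbrk]
        refine ⟨by omega, Or.inr ⟨by omega, ?_⟩⟩
        simp only [List.sum_cons]; omega
      · rw [if_neg hbrk]
        obtain ⟨h1, h2⟩ := ih (r + f) hfs (by omega)
        refine ⟨h1, ?_⟩
        simp only [List.sum_cons]
        rcases h2 with h2 | ⟨h2a, h2b⟩
        · exact Or.inl (by omega)
        · exact Or.inr ⟨h2a, by omega⟩

-- A's calc agrees with B's closed form, up to the cap
theorem calc_spec (n : Int) (hn : 1 ≤ n) :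
    pvCalc n = pvTri n ∨ (pvCalc n > pvMax ∧ pvTri n > pvMax) := by
  rcases eq_or_lt_of_le hn with h1 | h2
  · left
    have : n = 1 := h1.symm
    subst this
    simp [pvCalc, pvTri, PySem.Int.floordiv]
  · -- n ≥ 2
    have hn2 : 2 ≤ n := by omega
    have hne : (n == 1) = false := by simp; omega
    have hcalc : pvCalc n = calcLoop (PySem.List.pyRange 2 n 1) 1 := by
      unfold pvCalc
      rw [hne, if_neg (by simp), if_pos (by omega)]
    have hmem : ∀ f ∈ PySem.List.pyRange 2 n 1, 0 ≤ f := by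
      intro f hf
      rw [PySem.List.mem_pyRange_one] at hf
      omega
    have hsum := sum_pyRange_two n hn2
    have htri : pvTri n = 1 + (PySem.List.pyRange 2 n 1).sum := by
      unfold pvTri
      rw [PySem.Int.floordiv_eq_iff_of_pos (by norm_num)]
      constructor <;> nlinarith [hsum]
    obtain ⟨_, h⟩ := calcLoop_spec (PySem.List.pyRange 2 n 1) 1 hmem (by norm_num)
    rcases h with h | ⟨ha, hb⟩
    · left; rw [hcalc, h, htri]
    · right; exact ⟨by omega, by omega⟩

-- A's summation loop equals the capped closed-form sum
theorem solLoop_spec (m : PySem.Dict Int Int) (vs : List Int) (total : Int)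
    (hv : ∀ v ∈ vs, 1 ≤ m.getD v 0) (h0 : 0 ≤ total) (hM : total ≤ pvMax) :
    solLoop m vs total =
      if total + (vs.map (fun v => pvTri (m.getD v 0))).sum > pvMax then pvMax
      else total + (vs.map (fun v => pvTri (m.getD v 0))).sum := by
  induction vs generalizing total with
  | nil => simp [solLoop, hM]
  | cons v vs ih =>
      have hv1 : 1 ≤ m.getD v 0 := hv v (by simp)
      have hvs : ∀ w ∈ vs, 1 ≤ m.getD w 0 := fun w hw => hv w (List.mem_cons_of_mem _ hw)
      have hsum : 0 ≤ (vs.map (fun w => pvTri (m.getD w 0))).sum := by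
        apply List.sum_nonneg
        intro x hx
        obtain ⟨w, _, rfl⟩ := List.mem_map.mp hx
        exact tri_nonneg _
      have htri0 : 0 ≤ pvTri (m.getD v 0) := tri_nonneg _
      rw [solLoop_cons]
      simp only [List.map_cons, List.sum_cons]
      rcases calc_spec (m.getD v 0) hv1 with hc | ⟨hca, hcb⟩
      · rw [hc]
        by_cases hb : total + pvTri (m.getD v 0) > pvMax
        · rw [if_pos hb]
          have hbig : total + (pvTri (m.getD v 0) + (vs.map (fun w => pvTri (m.getD w 0))).sum) > pvMax := by omega
          rw [if_pos hbig]
        · rw [if_neg hb]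
          rw [ih (total + pvTri (m.getD v 0)) hvs (by omega) (by omega)]
          have harr : total + pvTri (m.getD v 0) + (vs.map (fun w => pvTri (m.getD w 0))).sum
              = total + (pvTri (m.getD v 0) + (vs.map (fun w => pvTri (m.getD w 0))).sum) := by ring
          rw [harr]
      · have hb : total + pvCalc (m.getD v 0) > pvMax := by omega
        rw [if_pos hb]
        have hbig : total + (pvTri (m.getD v 0) + (vs.map (fun w => pvTri (m.getD w 0))).sum) > pvMax := by omega
        rw [if_pos hbig]

-- ===== VERDICT (by name: the statement is the Claim_ definition above) =====
theorem Solution_spec : Claim_equal_Solution := by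
  intro A _
  unfold Spec_Solution Solution Solution_alt
  -- the two counting folds build the same dict
  have hfold : A.foldl
      (fun d i => if d.contains i = false then d.insert i 1 else d.insert i (d.getD i 0 + 1))
      PySem.Dict.empty
      = A.foldl (fun d i => d.insert i (d.getD i 0 + 1)) (PySem.Dict.empty : PySem.Dict Int Int) := by
    apply PySem.List.foldl_congr_mem
    intro d i _
    by_cases h : d.contains i = true
    · simp [h]
    · have h' : d.contains i = false := by simpa using h
      simp [h', PySem.Dict.getD_of_not_contains]
  rw [hfold, PySem.Dict.foldl_insert_getD_add_one_eq_counter]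
  set m := PySem.Dict.counter A with hm
  have hnd : m.keys.Nodup := PySem.Dict.nodup_keys_counter A
  have hvals : m.values = m.keys.map (fun k => m.getD k 0) :=
    PySem.Dict.values_eq_map_keys m hnd 0
  have hv : ∀ v ∈ m.keys, 1 ≤ m.getD v 0 := by
    intro v hvk
    rw [hm, PySem.Dict.keys_counter] at hvk
    have hmem : v ∈ A := (PySem.Set.mem_ofList A v).mp hvk
    rw [hm, PySem.Dict.getD_counter]
    have : 0 < A.count v := List.count_pos_iff.mpr hmem
    omega
  rw [solLoop_spec m m.keys 0 hv (by norm_num) (by norm_num [pvMax])]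
  simp only [hvals, List.map_map, Function.comp_def, pvMax, pvTri, zero_add]
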